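-- pv_equiv track=rewrite | github.com/kmaladkar/wardrobe | src/wardrobe/api/routes/recommendations.py | _pick_garment_for_tryon
-- ===== SOURCE A (Python) =====
-- def _pick_garment_for_tryon(items: list[dict]) -> tuple[str, str] | None:
--     """Pick best garment for try-on: prefer top/jacket (torso), then bottom, then footwear. Returns (image_id, category)."""
--     for cat in ("top", "jacket", "bottom", "footwear"):
--         for r in items:
--             if r.get("category") == cat:
--                 return (r["image_id"], cat)
--     if items:
--         r = items[0]
--         return (r["image_id"], r.get("category", "top"))
--     return None
-- ===== SOURCE B (Python) =====
-- _PRIO = {"top": 0, "jacket": 1, "bottom": 2, "footwear": 3}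
--
--
-- def _pick_garment_for_tryon(items: list[dict]) -> tuple[str, str] | None:
--     """Stable min-by-priority-rank selection: min() returns the FIRST item of best rank."""
--     if not items:
--         return None
--     best = min(items, key=lambda r: _PRIO.get(r.get("category"), 4))
--     cat = best.get("category")
--     if cat in _PRIO:
--         return (best["image_id"], cat)
--     r = items[0]
--     return (r["image_id"], r.get("category", "top"))
-- ===== Notes on version B (the rewrite author's own statement) =====
-- stated objective: alternative
-- what changed: A scans the whole item list once per priority category (four staged passes plus a fallback); B maps each item to a numeric priority rank and takes the single stable min() of one pass, reading image_id only from the finally chosen item.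
import Mathlib
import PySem

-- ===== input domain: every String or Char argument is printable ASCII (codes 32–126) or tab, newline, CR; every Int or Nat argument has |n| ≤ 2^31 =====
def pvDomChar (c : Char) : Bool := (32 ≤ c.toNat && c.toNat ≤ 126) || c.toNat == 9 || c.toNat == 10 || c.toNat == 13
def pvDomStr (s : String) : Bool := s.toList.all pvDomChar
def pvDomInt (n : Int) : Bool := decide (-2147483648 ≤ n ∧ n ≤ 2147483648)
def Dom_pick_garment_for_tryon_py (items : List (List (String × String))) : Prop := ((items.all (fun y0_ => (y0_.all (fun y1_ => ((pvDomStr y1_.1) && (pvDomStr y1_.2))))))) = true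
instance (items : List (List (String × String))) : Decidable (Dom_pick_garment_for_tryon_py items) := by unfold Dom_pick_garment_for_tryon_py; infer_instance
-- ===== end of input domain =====

-- B replaces A's four full scans of the item list by a single stable min-by-priority-rank selection (alternative algorithm, similar cost); Pre_ excludes inputs where A raises KeyError.


-- shared helper: Python's r.get(k) on an item dict (first match in the association list)
def dget (r : List (String × String)) (k : String) : Option String :=
  (PySem.Dict.mk r).get? k

-- ===== PORT A =====
-- inner 'for r in items: if r.get("category") == cat: return (r["image_id"], cat)'
-- (r["image_id"] raises KeyError when absent; those inputs are outside Pre_, the port uses getD "")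
def aScanCat (cat : String) : List (List (String × String)) → Option (String × String)
  | [] => none
  | r :: rest =>
      if dget r "category" = some cat then some ((dget r "image_id").getD "", cat)
      else aScanCat cat rest

-- outer 'for cat in ("top","jacket","bottom","footwear")'
def aLoop (items : List (List (String × String))) : List String → Option (String × String)
  | [] => none
  | cat :: cats =>
      match aScanCat cat items with
      | some res => some res
      | none => aLoop items cats

def pick_garment_for_tryon_py (items : List (List (String × String))) : Option (String × String) :=
  match aLoop items ["top", "jacket", "bottom", "footwear"] with
  | some res => some res
  | none =>
      match items with
      | [] => none
      | r :: _ => some ((dget r "image_id").getD "", (dget r "category").getD "top")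

-- ===== PORT B =====
-- _PRIO = {"top": 0, "jacket": 1, "bottom": 2, "footwear": 3}
def prioDict : PySem.Dict String Nat :=
  PySem.Dict.mk [("top", 0), ("jacket", 1), ("bottom", 2), ("footwear", 3)]

-- key=lambda r: _PRIO.get(r.get("category"), 4)
def brank (r : List (String × String)) : Nat :=
  match dget r "category" with
  | some c => (prioDict.get? c).getD 4
  | none => 4

def pick_garment_for_tryon_py_alt (items : List (List (String × String))) : Option (String × String) :=
  match items with
  | [] => none
  | r0 :: _ =>
      -- best = min(items, key=...): PySem.List.min? is Python's min, the FIRST extremal element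
      match PySem.List.min? items brank with
      | some best =>
          match dget best "category" with
          | some c =>
              if prioDict.contains c then some ((dget best "image_id").getD "", c)
              else some ((dget r0 "image_id").getD "", (dget r0 "category").getD "top")
          | none => some ((dget r0 "image_id").getD "", (dget r0 "category").getD "top")
      | none => none  -- unreachable: min? of a non-empty list is some

-- ===== PRECONDITION & SPEC =====
-- the item the function selects: first item per category in priority order, else the head of the list
def pvChosen (items : List (List (String × String))) : Option (List (String × String)) :=
  ((((items.find? (fun r => dget r "category" == some "top")).orElse (fun _ =>
      items.find? (fun r => dget r "category" == some "jacket"))).orElse (fun _ =>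
      items.find? (fun r => dget r "category" == some "bottom"))).orElse (fun _ =>
      items.find? (fun r => dget r "category" == some "footwear"))).orElse (fun _ => items.head?)

-- Pre_ excludes exactly the inputs on which A raises KeyError: those whose selected item (first item
-- of the highest-priority category present, else the first item) lacks an "image_id" key.
def Pre_pick_garment_for_tryon_py (items : List (List (String × String))) : Prop :=
  ∀ r ∈ pvChosen items, (dget r "image_id").isSome = true

instance (items : List (List (String × String))) : Decidable (Pre_pick_garment_for_tryon_py items) := by
  unfold Pre_pick_garment_for_tryon_py; infer_instance

def pvWitness_pick_garment_for_tryon_py : (List (List (String × String))) :=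
  [[("category", "top"), ("image_id", "a")], [("image_id", "b")]]

def Spec_pick_garment_for_tryon_py (items : List (List (String × String))) (out : Option (String × String)) : Prop := out = pick_garment_for_tryon_py_alt items
instance (items : List (List (String × String))) (out : Option (String × String)) : Decidable (Spec_pick_garment_for_tryon_py items out) := by unfold Spec_pick_garment_for_tryon_py; infer_instance

-- ===== CLAIM (what is proved, stated in full; the proofs are below) =====
def Claim_equal_pick_garment_for_tryon_py : Prop := ∀ (items : List (List (String × String))), Dom_pick_garment_for_tryon_py items → Pre_pick_garment_for_tryon_py items → Spec_pick_garment_for_tryon_py items (pick_garment_for_tryon_py items)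

-- ===== LEMMAS AND PROOFS =====

-- first item with the given category
def fcat (items : List (List (String × String))) (c : String) : Option (List (String × String)) :=
  items.find? (fun r => dget r "category" == some c)

-- brank written as a decision tree on the category
theorem brank_tree (r : List (String × String)) :
    brank r =
      if dget r "category" = some "top" then 0
      else if dget r "category" = some "jacket" then 1
      else if dget r "category" = some "bottom" then 2
      else if dget r "category" = some "footwear" then 3
      else 4 := by
  unfold brank prioDict
  cases h : dget r "category" with
  | none => simp
  | some c =>
      simp only [PySem.Dict.get?_mk_cons]
      by_cases h1 : c = "top"
      · simp [h1]
      · by_cases h2 : c = "jacket"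
        · simp [h2]
        · by_cases h3 : c = "bottom"
          · simp [h3]
          · by_cases h4 : c = "footwear"
            · simp [h4]
            · simp [h1, h2, h3, h4, Ne.symm h1, Ne.symm h2, Ne.symm h3, Ne.symm h4,
                    show (PySem.Dict.mk ([] : List (String × Nat))).get? c = none from rfl]

theorem fcat_some {items : List (List (String × String))} {c : String}
    {m : List (String × String)} (h : fcat items c = some m) :
    dget m "category" = some c := by
  have := List.find?_some h
  simpa using this

theorem fcat_none {items : List (List (String × String))} {c : String}
    (h : fcat items c = none) : ∀ r ∈ items, dget r "category" ≠ some c := by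
  intro r hr
  have := List.find?_eq_none.mp h r hr
  simpa using this

-- the four-stage priority choice with head fallback (= pvChosen)
def chain (items : List (List (String × String))) : Option (List (String × String)) :=
  ((((fcat items "top").orElse (fun _ => fcat items "jacket")).orElse (fun _ =>
      fcat items "bottom")).orElse (fun _ => fcat items "footwear")).orElse (fun _ => items.head?)

-- rank of whatever chain returns, in terms of which find fired
theorem chain_rank {items : List (List (String × String))} {m : List (String × String)}
    (h : chain items = some m) :
    (fcat items "top" = some m ∧ brank m = 0) ∨
    (fcat items "top" = none ∧ fcat items "jacket" = some m ∧ brank m = 1) ∨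
    (fcat items "top" = none ∧ fcat items "jacket" = none ∧ fcat items "bottom" = some m ∧ brank m = 2) ∨
    (fcat items "top" = none ∧ fcat items "jacket" = none ∧ fcat items "bottom" = none ∧
      fcat items "footwear" = some m ∧ brank m = 3) ∨
    (fcat items "top" = none ∧ fcat items "jacket" = none ∧ fcat items "bottom" = none ∧
      fcat items "footwear" = none ∧ items.head? = some m ∧ brank m = 4) := by
  unfold chain at h
  cases h0 : fcat items "top" with
  | some v =>
      left
      rw [h0] at h; simp [Option.orElse] at h
      have hc := fcat_some h0
      subst h
      exact ⟨rfl, by rw [brank_tree, if_pos hc]⟩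
  | none =>
  rw [h0] at h
  cases h1 : fcat items "jacket" with
  | some v =>
      right; left
      rw [h1] at h; simp [Option.orElse] at h
      have hc := fcat_some h1
      subst h
      refine ⟨rfl, rfl, ?_⟩
      rw [brank_tree, if_neg (by simp [hc]), if_pos hc]
  | none =>
  rw [h1] at h
  cases h2 : fcat items "bottom" with
  | some v =>
      right; right; left
      rw [h2] at h; simp [Option.orElse] at h
      have hc := fcat_some h2
      subst h
      refine ⟨rfl, rfl, rfl, ?_⟩
      rw [brank_tree, if_neg (by simp [hc]), if_neg (by simp [hc]), if_pos hc]
  | none =>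
  rw [h2] at h
  cases h3 : fcat items "footwear" with
  | some v =>
      right; right; right; left
      rw [h3] at h; simp [Option.orElse] at h
      have hc := fcat_some h3
      subst h
      refine ⟨rfl, rfl, rfl, rfl, ?_⟩
      rw [brank_tree, if_neg (by simp [hc]), if_neg (by simp [hc]), if_neg (by simp [hc]), if_pos hc]
  | none =>
  right; right; right; right
  rw [h3] at h; simp [Option.orElse] at h
  refine ⟨rfl, rfl, rfl, rfl, h, ?_⟩
  have hm : m ∈ items := by
    cases items with
    | nil => simp at h
    | cons a t => simp at h; subst h; exact List.mem_cons_self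
  rw [brank_tree]
  rw [if_neg (fcat_none h0 m hm), if_neg (fcat_none h1 m hm),
      if_neg (fcat_none h2 m hm), if_neg (fcat_none h3 m hm)]

theorem fcat_cons_self {a : List (String × String)} (t : List (List (String × String)))
    {c : String} (h : dget a "category" = some c) : fcat (a :: t) c = some a := by
  simp [fcat, h]

theorem fcat_cons_ne {a : List (String × String)} (t : List (List (String × String)))
    {c : String} (h : ¬ dget a "category" = some c) : fcat (a :: t) c = fcat t c := by
  simp [fcat, h]

theorem chain_eq_none {t : List (List (String × String))} (h : chain t = none) : t = [] := by
  cases t with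
  | nil => rfl
  | cons a s =>
      exfalso
      unfold chain at h
      cases hx : (((fcat (a :: s) "top").orElse (fun _ => fcat (a :: s) "jacket")).orElse
          (fun _ => fcat (a :: s) "bottom")).orElse (fun _ => fcat (a :: s) "footwear") with
      | some v => rw [hx] at h; simp [Option.orElse] at h
      | none => rw [hx] at h; simp [Option.orElse] at h

-- chain satisfies the running-min recurrence
theorem chain_cons (a : List (String × String)) (t : List (List (String × String))) :
    chain (a :: t) =
      match chain t with
      | none => some a
      | some m => if brank m < brank a then some m else some a := by
  by_cases h1 : dget a "category" = some "top"
  · -- head fires at stage 0; brank a = 0, nothing can beat it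
    have hba : brank a = 0 := by rw [brank_tree, if_pos h1]
    have hL : chain (a :: t) = some a := by
      unfold chain; rw [fcat_cons_self t h1]; rfl
    rw [hL]
    cases hm : chain t with
    | none => rfl
    | some m => simp [hba]
  · by_cases h2 : dget a "category" = some "jacket"
    · have hba : brank a = 1 := by rw [brank_tree, if_neg h1, if_pos h2]
      have hL : chain (a :: t)
          = match fcat t "top" with | some v => some v | none => some a := by
        unfold chain
        rw [fcat_cons_ne t h1, fcat_cons_self t h2]
        cases fcat t "top" <;> rfl
      rw [hL]
      cases hm : chain t with
      | none =>
          have ht : t = [] := chain_eq_none hm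
          subst ht; rfl
      | some m =>
          rcases chain_rank hm with ⟨g0, gb⟩ | ⟨g0, g1, gb⟩ | ⟨g0, g1, g2, gb⟩ |
            ⟨g0, g1, g2, g3, gb⟩ | ⟨g0, g1, g2, g3, gh, gb⟩ <;>
            simp [g0, hba, gb]
    · by_cases h3 : dget a "category" = some "bottom"
      · have hba : brank a = 2 := by rw [brank_tree, if_neg h1, if_neg h2, if_pos h3]
        have hL : chain (a :: t)
            = match (fcat t "top").orElse (fun _ => fcat t "jacket") with
              | some v => some v | none => some a := by
          unfold chain
          rw [fcat_cons_ne t h1, fcat_cons_ne t h2, fcat_cons_self t h3]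
          cases (fcat t "top").orElse (fun _ => fcat t "jacket") <;> rfl
        rw [hL]
        cases hm : chain t with
        | none =>
            have ht : t = [] := chain_eq_none hm
            subst ht; rfl
        | some m =>
            rcases chain_rank hm with ⟨g0, gb⟩ | ⟨g0, g1, gb⟩ | ⟨g0, g1, g2, gb⟩ |
              ⟨g0, g1, g2, g3, gb⟩ | ⟨g0, g1, g2, g3, gh, gb⟩ <;>
              simp_all [Option.orElse]
      · by_cases h4 : dget a "category" = some "footwear"
        · have hba : brank a = 3 := by
            rw [brank_tree, if_neg h1, if_neg h2, if_neg h3, if_pos h4]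
          have hL : chain (a :: t)
              = match ((fcat t "top").orElse (fun _ => fcat t "jacket")).orElse
                      (fun _ => fcat t "bottom") with
                | some v => some v | none => some a := by
            unfold chain
            rw [fcat_cons_ne t h1, fcat_cons_ne t h2, fcat_cons_ne t h3, fcat_cons_self t h4]
            cases ((fcat t "top").orElse (fun _ => fcat t "jacket")).orElse
              (fun _ => fcat t "bottom") <;> rfl
          rw [hL]
          cases hm : chain t with
          | none =>
              have ht : t = [] := chain_eq_none hm
              subst ht; rfl
          | some m =>
              rcases chain_rank hm with ⟨g0, gb⟩ | ⟨g0, g1, gb⟩ | ⟨g0, g1, g2, gb⟩ |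
                ⟨g0, g1, g2, g3, gb⟩ | ⟨g0, g1, g2, g3, gh, gb⟩ <;>
                simp_all [Option.orElse]
        · -- head has no priority category: brank a = 4, head only matters as fallback
          have hba : brank a = 4 := by
            rw [brank_tree, if_neg h1, if_neg h2, if_neg h3, if_neg h4]
          have hL : chain (a :: t)
              = match (((fcat t "top").orElse (fun _ => fcat t "jacket")).orElse
                       (fun _ => fcat t "bottom")).orElse (fun _ => fcat t "footwear") with
                | some v => some v | none => some a := by
            unfold chain
            rw [fcat_cons_ne t h1, fcat_cons_ne t h2, fcat_cons_ne t h3, fcat_cons_ne t h4]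
            cases (((fcat t "top").orElse (fun _ => fcat t "jacket")).orElse
              (fun _ => fcat t "bottom")).orElse (fun _ => fcat t "footwear") <;> rfl
          rw [hL]
          cases hm : chain t with
          | none =>
              have ht : t = [] := chain_eq_none hm
              subst ht; rfl
          | some m =>
              rcases chain_rank hm with ⟨g0, gb⟩ | ⟨g0, g1, gb⟩ | ⟨g0, g1, g2, gb⟩ |
                ⟨g0, g1, g2, g3, gb⟩ | ⟨g0, g1, g2, g3, gh, gb⟩ <;>
                simp_all [Option.orElse]

-- min?'s running-min recurrence on a cons
theorem min?_cons (a : List (String × String)) (t : List (List (String × String))) :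
    PySem.List.min? (a :: t) brank =
      match PySem.List.min? t brank with
      | none => some a
      | some m => if brank m < brank a then some m else some a := by
  induction t generalizing a with
  | nil => simp [PySem.List.min?]
  | cons y ys ih =>
      have key : PySem.List.min? (a :: y :: ys) brank
          = PySem.List.min? ((if brank y < brank a then y else a) :: ys) brank := by
        by_cases hy : brank y < brank a <;> simp [PySem.List.min?, hy]
      rw [key, ih, ih y]
      cases hm : PySem.List.min? ys brank with
      | none => by_cases hy : brank y < brank a <;> simp [hy]
      | some m =>
          by_cases hy : brank y < brank a <;>
            by_cases hmy : brank m < brank y <;>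
            by_cases hma : brank m < brank a <;>
            simp [hy, hmy, hma] <;>
            (first | rfl | (exfalso; omega))

-- min? IS the priority chain
theorem min?_eq_chain (items : List (List (String × String))) :
    PySem.List.min? items brank = chain items := by
  induction items with
  | nil => simp [PySem.List.min?, chain, fcat, Option.orElse]
  | cons a t ih => rw [min?_cons, ih, chain_cons]

-- A's inner scan is 'first item with this category'
theorem aScanCat_eq_find (cat : String) (items : List (List (String × String))) :
    aScanCat cat items
      = (fcat items cat).map (fun r => ((dget r "image_id").getD "", cat)) := by
  induction items with
  | nil => rfl
  | cons r rest ih =>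
      simp only [aScanCat, fcat, List.find?]
      by_cases h : dget r "category" = some cat
      · simp [h]
      · rw [show (dget r "category" == some cat) = false from by simpa using h]
        simp [fcat] at ih
        simp [h, ih]

-- ===== VERDICT (by name: the statement is the Claim_ definition above) =====
theorem pick_garment_for_tryon_py_spec : Claim_equal_pick_garment_for_tryon_py := by
  intro items _ _
  unfold Spec_pick_garment_for_tryon_py pick_garment_for_tryon_py pick_garment_for_tryon_py_alt
  cases items with
  | nil => rfl
  | cons a t =>
      rw [min?_eq_chain]
      cases hm : chain (a :: t) with
      | none => exact absurd (chain_eq_none hm) (by simp)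
      | some best =>
          rcases chain_rank hm with ⟨g0, gb⟩ | ⟨g0, g1, gb⟩ | ⟨g0, g1, g2, gb⟩ |
            ⟨g0, g1, g2, g3, gb⟩ | ⟨g0, g1, g2, g3, gh, gb⟩
          · have hc := fcat_some g0
            simp [aLoop, aScanCat_eq_find, g0, hc, show prioDict.contains "top" = true from rfl]
          · have hc := fcat_some g1
            simp [aLoop, aScanCat_eq_find, g0, g1, hc,
              show prioDict.contains "jacket" = true from rfl]
          · have hc := fcat_some g2
            simp [aLoop, aScanCat_eq_find, g0, g1, g2, hc,
              show prioDict.contains "bottom" = true from rfl]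
          · have hc := fcat_some g3
            simp [aLoop, aScanCat_eq_find, g0, g1, g2, g3, hc,
              show prioDict.contains "footwear" = true from rfl]
          · -- fallback: best = a, whose category is none of the four
            have hba : a = best := by simpa using gh
            subst hba
            have hmem : a ∈ a :: t := List.mem_cons_self
            have n0 := fcat_none g0 a hmem
            have n1 := fcat_none g1 a hmem
            have n2 := fcat_none g2 a hmem
            have n3 := fcat_none g3 a hmem
            cases hc : dget a "category" with
            | none => simp [aLoop, aScanCat_eq_find, g0, g1, g2, g3, hc]
            | some c =>
                have e0 : ¬ c = "top" := fun h => n0 (by rw [hc, h])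
                have e1 : ¬ c = "jacket" := fun h => n1 (by rw [hc, h])
                have e2 : ¬ c = "bottom" := fun h => n2 (by rw [hc, h])
                have e3 : ¬ c = "footwear" := fun h => n3 (by rw [hc, h])
                have hcon : prioDict.contains c = false := by
                  simp [prioDict, PySem.Dict.contains_mk,
                    Ne.symm e0, Ne.symm e1, Ne.symm e2, Ne.symm e3]
                simp [aLoop, aScanCat_eq_find, g0, g1, g2, g3, hc, hcon]
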